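-- pv_equiv track=rewrite | github.com/Ombhavsar218/redscan | rescanai/scan_controller.py | _get_comprehensive_web_messages
-- ===== SOURCE A (Python) =====
-- from typing import Dict, List, Any, Optional, Callable
--
-- def _get_comprehensive_web_messages(step_count: int) -> List[str]:
--     """Generate different comprehensive web scanning messages"""
--     base_messages = [
--         "Starting comprehensive web analysis...",
--         "Crawling website structure...",
--         "Analyzing web technologies...",
--         "Detecting CMS platforms...",
--         "Checking web frameworks...",
--         "Analyzing JavaScript libraries...",
--         "Detecting web server versions...",
--         "Checking SSL/TLS configurations...",
--         "Analyzing security headers...",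
--         "Testing authentication mechanisms...",
--         "Checking session management...",
--         "Analyzing input validation...",
--         "Testing for SQL injection...",
--         "Checking for XSS vulnerabilities...",
--         "Testing CSRF protection...",
--         "Analyzing file upload security...",
--         "Checking directory traversal...",
--         "Testing for information disclosure...",
--         "Analyzing error handling...",
--         "Checking for backup files...",
--         "Testing administrative interfaces...",
--         "Analyzing web application firewall...",
--         "Checking for security misconfigurations...",
--         "Testing API security...",
--         "Finalizing comprehensive web scan..."
--     ]
--
--     messages = []
--     for i in range(step_count):
--         messages.append(base_messages[i % len(base_messages)])
--     return messages
-- ===== SOURCE B (Python) =====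
-- from typing import Dict, List, Any, Optional, Callable
--
-- def _get_comprehensive_web_messages(step_count: int) -> List[str]:
--     """Generate different comprehensive web scanning messages"""
--     base_messages = [
--         "Starting comprehensive web analysis...",
--         "Crawling website structure...",
--         "Analyzing web technologies...",
--         "Detecting CMS platforms...",
--         "Checking web frameworks...",
--         "Analyzing JavaScript libraries...",
--         "Detecting web server versions...",
--         "Checking SSL/TLS configurations...",
--         "Analyzing security headers...",
--         "Testing authentication mechanisms...",
--         "Checking session management...",
--         "Analyzing input validation...",
--         "Testing for SQL injection...",
--         "Checking for XSS vulnerabilities...",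
--         "Testing CSRF protection...",
--         "Analyzing file upload security...",
--         "Checking directory traversal...",
--         "Testing for information disclosure...",
--         "Analyzing error handling...",
--         "Checking for backup files...",
--         "Testing administrative interfaces...",
--         "Analyzing web application firewall...",
--         "Checking for security misconfigurations...",
--         "Testing API security...",
--         "Finalizing comprehensive web scan..."
--     ]
--     if step_count <= 0:
--         return []
--     q, r = divmod(step_count, len(base_messages))
--     return base_messages * q + base_messages[:r]
-- ===== Notes on version B (the rewrite author's own statement) =====
-- stated objective: simpler
-- what changed: Replaces the per-index loop with modulo lookup by one divmod: whole-list repetition q times plus a prefix slice of length r.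
import Mathlib
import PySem

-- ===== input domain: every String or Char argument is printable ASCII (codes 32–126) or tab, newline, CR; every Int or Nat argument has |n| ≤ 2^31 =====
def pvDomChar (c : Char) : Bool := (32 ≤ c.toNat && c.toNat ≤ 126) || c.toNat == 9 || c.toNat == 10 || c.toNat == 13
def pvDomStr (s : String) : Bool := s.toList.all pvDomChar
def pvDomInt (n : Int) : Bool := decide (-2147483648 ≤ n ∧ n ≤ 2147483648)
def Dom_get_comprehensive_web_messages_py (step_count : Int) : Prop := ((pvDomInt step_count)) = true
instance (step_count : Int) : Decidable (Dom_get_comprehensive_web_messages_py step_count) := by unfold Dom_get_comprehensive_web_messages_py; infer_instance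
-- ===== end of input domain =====

-- B replaces A's index loop with modulo lookup by one divmod: q whole copies of the list plus a prefix slice of length r (objective: simpler).

-- the fixed message list both Pythons spell out literally
def baseMessages : List String := [
  "Starting comprehensive web analysis...",
  "Crawling website structure...",
  "Analyzing web technologies...",
  "Detecting CMS platforms...",
  "Checking web frameworks...",
  "Analyzing JavaScript libraries...",
  "Detecting web server versions...",
  "Checking SSL/TLS configurations...",
  "Analyzing security headers...",
  "Testing authentication mechanisms...",
  "Checking session management...",
  "Analyzing input validation...",
  "Testing for SQL injection...",
  "Checking for XSS vulnerabilities...",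
  "Testing CSRF protection...",
  "Analyzing file upload security...",
  "Checking directory traversal...",
  "Testing for information disclosure...",
  "Analyzing error handling...",
  "Checking for backup files...",
  "Testing administrative interfaces...",
  "Analyzing web application firewall...",
  "Checking for security misconfigurations...",
  "Testing API security...",
  "Finalizing comprehensive web scan..."]

-- ===== PORT A =====
-- loop: for i in range(step_count): messages.append(base_messages[i % len(base_messages)])
-- base_messages[i % 25]: the index is always in range (0 ≤ i % 25 < 25), so the getD default is never used
def get_comprehensive_web_messages_py (step_count : Int) : List String :=
  (PySem.List.pyRange 0 step_count 1).foldl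
    (fun messages i =>
      messages ++ [PySem.List.pyGetD baseMessages (PySem.Int.mod i (baseMessages.length : Int)) ""])
    []

-- ===== PORT B =====
-- if step_count <= 0: return []; q, r = divmod(step_count, len(base)); return base*q + base[:r]
def get_comprehensive_web_messages_py_alt (step_count : Int) : List String :=
  if step_count ≤ 0 then []
  else
    let q := PySem.Int.floordiv step_count (baseMessages.length : Int)
    let r := PySem.Int.mod step_count (baseMessages.length : Int)
    List.flatten (List.replicate q.toNat baseMessages) ++ PySem.List.slice baseMessages none (some r)

-- ===== PRECONDITION & SPEC =====
def Spec_get_comprehensive_web_messages_py (step_count : Int) (out : List String) : Prop := out = get_comprehensive_web_messages_py_alt step_count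
instance (step_count : Int) (out : List String) : Decidable (Spec_get_comprehensive_web_messages_py step_count out) := by unfold Spec_get_comprehensive_web_messages_py; infer_instance

-- ===== CLAIM (what is proved, stated in full; the proofs are below) =====
def Claim_equal_get_comprehensive_web_messages_py : Prop := ∀ (step_count : Int), Dom_get_comprehensive_web_messages_py step_count → Spec_get_comprehensive_web_messages_py step_count (get_comprehensive_web_messages_py step_count)

-- ===== LEMMAS AND PROOFS =====

-- small prefixes of the cycle: for m ≤ 25 the first m looked-up messages are just 'take m'
lemma range_map_eq_take (m : Nat) (h : m ≤ 25) :
    (List.range m).map (fun k => baseMessages.getD (k % 25) "") = baseMessages.take m := by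
  apply List.ext_getElem
  · simp [baseMessages]; omega
  · intro i h1 h2
    have hlen : baseMessages.length = 25 := by decide
    have hi : i < 25 := by simp at h1; omega
    simp [List.getD_eq_getElem?_getD, Nat.mod_eq_of_lt hi,
      List.getElem?_eq_getElem (by omega : i < baseMessages.length)]

-- the cycle-lookup map over range m equals q whole copies plus a take of the remainder
lemma tile_eq (m : Nat) :
    (List.range m).map (fun k => baseMessages.getD (k % 25) "") =
      List.flatten (List.replicate (m / 25) baseMessages) ++ baseMessages.take (m % 25) := by
  induction m using Nat.strong_induction_on with
  | _ m ih =>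
    by_cases hm : m < 25
    · rw [Nat.div_eq_of_lt hm, Nat.mod_eq_of_lt hm]
      simpa using range_map_eq_take m (by omega)
    · obtain ⟨m', rfl⟩ : ∃ m', m = 25 + m' := ⟨m - 25, by omega⟩
      rw [List.range_add, List.map_append, List.map_map]
      have h1 : (List.range 25).map (fun k => baseMessages.getD (k % 25) "") = baseMessages := by
        rw [range_map_eq_take 25 le_rfl]; decide
      have h2 : ((fun k => baseMessages.getD (k % 25) "") ∘ (fun k => 25 + k)) =
          (fun k => baseMessages.getD (k % 25) "") := by
        funext k; simp [Nat.add_mod_left]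
      rw [h1, h2, ih m' (by omega)]
      have hd : (25 + m') / 25 = m' / 25 + 1 := by omega
      have hm' : (25 + m') % 25 = m' % 25 := Nat.add_mod_left 25 m'
      rw [hd, hm', List.replicate_succ, List.flatten_cons, List.append_assoc]

-- ===== VERDICT (by name: the statement is the Claim_ definition above) =====
theorem get_comprehensive_web_messages_py_spec : Claim_equal_get_comprehensive_web_messages_py := by
  intro s _
  unfold Spec_get_comprehensive_web_messages_py get_comprehensive_web_messages_py
    get_comprehensive_web_messages_py_alt
  by_cases hs : s ≤ 0
  · rw [PySem.List.pyRange_one_eq_nil hs, if_pos hs]; rfl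
  · rw [if_neg hs]
    obtain ⟨m, rfl⟩ : ∃ m : Nat, s = (m : Int) := ⟨s.toNat, by omega⟩
    rw [PySem.List.foldl_append_singleton_eq_map, PySem.List.pyRange_one,
      show ((m : Int) - 0).toNat = m from by omega, List.map_map]
    have hlen : (baseMessages.length : Int) = ((25 : Nat) : Int) := by norm_num [baseMessages]
    have hfun : ∀ g : Nat → Int, (∀ k, g k = (k : Int)) →
        ((fun i => PySem.List.pyGetD baseMessages
            (PySem.Int.mod i (baseMessages.length : Int)) "") ∘ g) =
        (fun k : Nat => baseMessages.getD (k % 25) "") := by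
      intro g hg
      funext k
      simp only [Function.comp_apply, hg, hlen, PySem.Int.mod_natCast, PySem.List.pyGetD_natCast]
    rw [hfun (fun k => 0 + (k : Int)) (fun k => by simp), tile_eq]
    simp only [hlen, PySem.Int.floordiv_natCast, PySem.Int.mod_natCast,
      PySem.List.slice_to_natCast, Int.toNat_natCast, List.nil_append]
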